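-- pv_equiv track=rewrite | github.com/gbrahmam/DSA-practise | def difference_sum_even_odd_index(number.py | difference_sum_even_odd_index
-- ===== SOURCE A (Python) =====
-- def difference_sum_even_odd_index(numbers):
--     ev_arr = 0
--     odd_arr = 0
--     for i in range(len(numbers)):
--         if i%2 == 0:
--             ev_arr+=numbers[i]
--         else:
--             odd_arr+=numbers[i]
--     return int(ev_arr - odd_arr)
-- ===== SOURCE B (Python) =====
-- def difference_sum_even_odd_index(numbers):
--     even_sum = sum(numbers[::2])
--     odd_sum = sum(numbers[1::2])
--     return int(even_sum - odd_sum)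
-- ===== Notes on version B (the rewrite author's own statement) =====
-- stated objective: idiomatic
-- what changed: Replaces the indexed loop with an i%2 branch routing each element into one of two accumulators by two independent strided-slice sums: sum(numbers[::2]) and sum(numbers[1::2]), subtracted at the end, with no explicit loop, index arithmetic or parity branch.
import Mathlib
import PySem

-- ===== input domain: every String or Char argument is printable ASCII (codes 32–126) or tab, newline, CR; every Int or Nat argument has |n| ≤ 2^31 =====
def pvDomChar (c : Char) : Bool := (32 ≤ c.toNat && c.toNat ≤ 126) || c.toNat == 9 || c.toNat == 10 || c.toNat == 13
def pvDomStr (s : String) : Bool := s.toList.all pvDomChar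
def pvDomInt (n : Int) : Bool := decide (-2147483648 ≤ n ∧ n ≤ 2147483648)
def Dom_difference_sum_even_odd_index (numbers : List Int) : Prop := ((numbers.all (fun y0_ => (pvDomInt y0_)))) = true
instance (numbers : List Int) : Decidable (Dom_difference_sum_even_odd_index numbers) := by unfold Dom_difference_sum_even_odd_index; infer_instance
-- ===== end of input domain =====

-- B replaces the indexed, parity-branched two-accumulator loop by two strided-slice
-- sums (numbers[::2] and numbers[1::2]) subtracted at the end (idiomatic; same O(n) cost).


-- ===== PORT A =====
-- ev_arr := 0; odd_arr := 0; for i in range(len(numbers)): parity branch on i adds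
-- numbers[i] (index always in range, so pyGetD is exact) to one of the accumulators;
-- return int(ev_arr - odd_arr) — int() is the identity on ints. i % 2 uses Lean's Int emod,
-- which coincides with Python's % here since i ≥ 0 and the divisor 2 is positive (exact).
def difference_sum_even_odd_index (numbers : List Int) : Int :=
  let st :=
    (PySem.List.pyRange 0 (PySem.List.len numbers) 1).foldl
      (fun (acc : Int × Int) i =>
        if i % 2 = 0 then (acc.1 + PySem.List.pyGetD numbers i 0, acc.2)
        else (acc.1, acc.2 + PySem.List.pyGetD numbers i 0))
      (0, 0)
  st.1 - st.2

-- ===== PORT B =====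
-- even_sum := sum(numbers[::2]); odd_sum := sum(numbers[1::2]); return int(even_sum - odd_sum).
-- numbers[::2] / numbers[1::2] are PySem.List.slice? with step 2 (some, since step ≠ 0;
-- .getD [] only discharges the option); sum() is List.sum; int() is the identity on ints.
def difference_sum_even_odd_index_alt (numbers : List Int) : Int :=
  let even_sum := ((PySem.List.slice? numbers none none 2).getD []).sum
  let odd_sum := ((PySem.List.slice? numbers (some 1) none 2).getD []).sum
  even_sum - odd_sum

-- ===== PRECONDITION & SPEC =====
def Spec_difference_sum_even_odd_index (numbers : List Int) (out : Int) : Prop := out = difference_sum_even_odd_index_alt numbers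
instance (numbers : List Int) (out : Int) : Decidable (Spec_difference_sum_even_odd_index numbers out) := by unfold Spec_difference_sum_even_odd_index; infer_instance

-- ===== CLAIM (what is proved, stated in full; the proofs are below) =====
def Claim_equal_difference_sum_even_odd_index : Prop := ∀ (numbers : List Int), Dom_difference_sum_even_odd_index numbers → Spec_difference_sum_even_odd_index numbers (difference_sum_even_odd_index numbers)

-- ===== LEMMAS AND PROOFS =====

-- the even-index and odd-index sublists, by mutual structural recursion
mutual
def pvEvens : List Int → List Int
  | [] => []
  | a :: t => a :: pvOdds t
def pvOdds : List Int → List Int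
  | [] => []
  | _ :: t => pvEvens t
end

-- (even-index sum, odd-index sum) of a list, by structural recursion.
def pvAlt : List Int → Int × Int
  | [] => (0, 0)
  | a :: t => ((pvAlt t).2 + a, (pvAlt t).1)

theorem pvAlt_eq : ∀ xs : List Int, pvAlt xs = ((pvEvens xs).sum, (pvOdds xs).sum) := by
  intro xs
  induction xs with
  | nil => simp [pvAlt, pvEvens, pvOdds]
  | cons a t ih => simp [pvAlt, pvEvens, pvOdds, ih]; ring

-- A's loop body, rephrased over Nat indices and List.getD.
def pvStep (xs : List Int) (q : Int × Int) (k : Nat) : Int × Int :=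
  if k % 2 = 0 then (q.1 + xs.getD k 0, q.2) else (q.1, q.2 + xs.getD k 0)

-- generic swap lemma: a fold whose body is the swapped body folds to the swapped result
theorem pv_swap_fold {g f : Int × Int → Nat → Int × Int}
    (h : ∀ q k, g q k = (f q.swap k).swap) :
    ∀ (l : List Nat) (p : Int × Int), l.foldl g p = (l.foldl f p.swap).swap := by
  intro l
  induction l with
  | nil => intro p; simp
  | cons a t ih => intro p; simp only [List.foldl_cons, h]; rw [ih]; simp

theorem pv_fA_spec :
    ∀ (xs : List Int) (e o : Int),
      (List.range xs.length).foldl (pvStep xs) (e, o)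
        = (e + (pvAlt xs).1, o + (pvAlt xs).2) := by
  intro xs
  induction xs with
  | nil => intro e o; simp [pvAlt]
  | cons a t ih =>
    intro e o
    have hswap : ∀ (q : Int × Int) (k : Nat),
        pvStep (a :: t) q (k + 1) = (pvStep t q.swap k).swap := by
      intro q k
      simp only [pvStep, List.getD_cons_succ]
      rcases Nat.even_or_odd k with hk | hk
      · have h1 : k % 2 = 0 := Nat.even_iff.mp hk
        have h2 : ¬ (k + 1) % 2 = 0 := by omega
        simp [h1, h2, Prod.swap]
      · have h1 : ¬ k % 2 = 0 := by
          have := Nat.odd_iff.mp hk; omega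
        have h2 : (k + 1) % 2 = 0 := by
          have := Nat.odd_iff.mp hk; omega
        simp [h1, h2, Prod.swap]
    calc (List.range (a :: t).length).foldl (pvStep (a :: t)) (e, o)
        = ((List.range t.length).map Nat.succ).foldl (pvStep (a :: t))
            (pvStep (a :: t) (e, o) 0) := by
          rw [List.length_cons, List.range_succ_eq_map, List.foldl_cons]
      _ = (List.range t.length).foldl
            (fun q k => pvStep (a :: t) q (k + 1)) (e + a, o) := by
          rw [List.foldl_map]
          simp [pvStep]
      _ = ((List.range t.length).foldl (pvStep t) (o, e + a)).swap := by
          exact pv_swap_fold hswap (List.range t.length) (e + a, o)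
      _ = (e + (pvAlt (a :: t)).1, o + (pvAlt (a :: t)).2) := by
          rw [ih]
          simp only [pvAlt, Prod.swap, Prod.mk.injEq]
          exact ⟨by ring, trivial⟩

-- convert A's pyRange/pyGetD fold to the Nat-indexed fold pvStep
theorem pv_portA_eq (xs : List Int) :
    difference_sum_even_odd_index xs
      = ((List.range xs.length).foldl (pvStep xs) (0, 0)).1
        - ((List.range xs.length).foldl (pvStep xs) (0, 0)).2 := by
  unfold difference_sum_even_odd_index
  have hr : PySem.List.pyRange 0 (PySem.List.len xs) 1
      = (List.range xs.length).map (fun k : Nat => (0 : Int) + (k : Int)) := by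
    rw [PySem.List.pyRange_one]
    simp [PySem.List.len]
  rw [hr, List.foldl_map]
  simp only [zero_add]
  have hf : (fun (acc : Int × Int) (k : Nat) =>
      if (k : Int) % 2 = 0 then (acc.1 + PySem.List.pyGetD xs (k : Int) 0, acc.2)
      else (acc.1, acc.2 + PySem.List.pyGetD xs (k : Int) 0)) = pvStep xs := by
    funext q k
    have hm : ((k : Int) % 2 = 0) = ((k % 2 : Nat) = 0) := by
      simp only [eq_iff_iff]
      omega
    simp [pvStep, PySem.List.pyGetD_natCast, hm]
  rw [hf]

-- the strided index lists, in filterMap-over-range form, are pvEvens / pvOdds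
theorem pv_filterMap_stride :
    ∀ xs : List Int,
      ((List.range ((xs.length + 1) / 2)).filterMap (fun k => xs[2 * k]?) = pvEvens xs)
      ∧ ((List.range (xs.length / 2)).filterMap (fun k => xs[2 * k + 1]?) = pvOdds xs) := by
  intro xs
  induction xs with
  | nil => simp [pvEvens, pvOdds]
  | cons a t ih =>
    constructor
    · have hc : ((a :: t).length + 1) / 2 = t.length / 2 + 1 := by
        simp only [List.length_cons]; omega
      rw [hc, List.range_succ_eq_map, List.filterMap_cons, List.filterMap_map]
      have h0 : (a :: t)[2 * 0]? = some a := by simp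
      have hfun : ((fun k => (a :: t)[2 * k]?) ∘ Nat.succ)
          = fun k => t[2 * k + 1]? := by
        funext k
        have : 2 * (k + 1) = (2 * k + 1) + 1 := by omega
        simp [Function.comp, this]
      rw [h0, hfun, ih.2]
      simp [pvEvens]
    · have hc : (a :: t).length / 2 = (t.length + 1) / 2 := by
        simp only [List.length_cons]
      have hfun : (fun k => (a :: t)[2 * k + 1]?) = fun k => t[2 * k]? := by
        funext k; simp
      rw [hc, hfun, ih.1]
      simp [pvOdds]

-- numbers[::2] is the even-index sublist
theorem pv_slice_even (xs : List Int) :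
    PySem.List.slice? xs none none 2 = some (pvEvens xs) := by
  rw [← (pv_filterMap_stride xs).1]
  simp only [PySem.List.slice?, PySem.List.sliceIndices]
  norm_num
  have hx : (((xs.length : Int) + 2 - 1) / 2).toNat = (xs.length + 1) / 2 := by
    have h1 : ((xs.length : Int) + 2 - 1) = ((xs.length + 1 : Nat) : Int) := by push_cast; ring
    rw [h1]
    norm_cast
  have hc : (if 0 < xs.length
      then (((xs.length : Int) + 2 - 1) / 2).toNat else 0) = (xs.length + 1) / 2 := by
    rw [hx]
    split
    · rfl
    · omega
  have hf : (fun k : Nat => xs[(2 * (k : Int)).toNat]?)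
      = fun k : Nat => xs[2 * k]? := by
    funext k
    have h2 : (2 * (k : Int)).toNat = 2 * k := by omega
    rw [h2]
  rw [hc, hf]

-- numbers[1::2] is the odd-index sublist
theorem pv_slice_odd (xs : List Int) :
    PySem.List.slice? xs (some 1) none 2 = some (pvOdds xs) := by
  cases xs with
  | nil => rfl
  | cons a t =>
    rw [← (pv_filterMap_stride (a :: t)).2]
    simp only [PySem.List.slice?, PySem.List.sliceIndices]
    norm_num
    have hx : (((t.length : Int) + 2 - 1) / 2).toNat = (t.length + 1) / 2 := by
      have h1 : ((t.length : Int) + 2 - 1) = ((t.length + 1 : Nat) : Int) := by push_cast; ring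
      rw [h1]
      norm_cast
    have hc : (if 0 < t.length
        then (((t.length : Int) + 2 - 1) / 2).toNat else 0) = (t.length + 1) / 2 := by
      rw [hx]
      split
      · rfl
      · omega
    have hf : (fun k : Nat => (a :: t)[((1 : Int) + 2 * (k : Int)).toNat]?)
        = fun k : Nat => t[2 * k]? := by
      funext k
      have h2 : ((1 : Int) + 2 * (k : Int)).toNat = 2 * k + 1 := by omega
      rw [h2]
      simp
    rw [hc, hf]

-- ===== VERDICT (by name: the statement is the Claim_ definition above) =====
theorem difference_sum_even_odd_index_spec : Claim_equal_difference_sum_even_odd_index := by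
  intro numbers _
  unfold Spec_difference_sum_even_odd_index difference_sum_even_odd_index_alt
  rw [pv_portA_eq, pv_fA_spec, pvAlt_eq, pv_slice_even, pv_slice_odd]
  simp
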